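-- pv_equiv track=rewrite | github.com/Aasthaengg/IBMdataset | Python_codes/p03039/s700109998.py | mod_factorials
-- ===== SOURCE A (Python) =====
-- def mod_factorials(mod: int, N: [int]) -> [int]:
--   result = [1] * len(N)
--   tuples = sorted([(i, n) for i, n in enumerate(N)], key=lambda t: t[1])
--
--   fact = 1
--   i = 1
--   for t in tuples:
--     for j in range(i, t[1] + 1):
--       fact = fact * j % mod
--       i = i + 1
--
--     result[t[0]] = fact
--
--   return result
-- ===== SOURCE B (Python) =====
-- def mod_factorials(mod: int, N: [int]) -> [int]:
--   result = []
--   for n in N: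
--     f = 1
--     for j in range(1, n + 1):
--       f = f * j % mod
--     result.append(f)
--   return result
-- ===== Notes on version B (the rewrite author's own statement) =====
-- stated objective: simpler
-- what changed: B drops A's sort over enumerated indices and the shared incremental factorial/counter state, computing each element's factorial mod independently with a fresh inner loop and plain appends.
import Mathlib
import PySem

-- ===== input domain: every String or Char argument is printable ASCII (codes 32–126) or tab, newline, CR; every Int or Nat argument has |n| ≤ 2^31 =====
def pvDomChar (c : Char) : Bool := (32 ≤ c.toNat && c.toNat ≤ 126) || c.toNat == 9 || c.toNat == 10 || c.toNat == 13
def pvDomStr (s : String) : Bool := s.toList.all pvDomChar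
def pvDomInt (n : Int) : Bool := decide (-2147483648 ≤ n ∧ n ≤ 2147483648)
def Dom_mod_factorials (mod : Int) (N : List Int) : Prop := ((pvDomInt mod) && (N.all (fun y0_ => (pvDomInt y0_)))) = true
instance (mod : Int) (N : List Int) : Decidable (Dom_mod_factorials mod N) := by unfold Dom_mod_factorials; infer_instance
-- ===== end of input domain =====

-- B replaces A's sort-then-shared-incremental-factorial pass by an independent fresh
-- factorial loop per element, appended in input order (objective: simpler).

-- ===== PORT A =====
def mod_factorials (mod : Int) (N : List Int) : List Int :=
  let result := PySem.List.pyRepeat [(1 : Int)] (N.length : Int)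
  let tuples := PySem.List.sorted (PySem.List.enumerate N) (fun t => t.2) false
  let st := tuples.foldl
    (fun (s : List Int × Int × Int) t =>
      let inner := (PySem.List.pyRange s.2.2 (t.2 + 1) 1).foldl
        (fun (p : Int × Int) j => (PySem.Int.mod (p.1 * j) mod, p.2 + 1)) (s.2.1, s.2.2)
      (PySem.List.pySetD s.1 t.1 inner.1, inner.1, inner.2))
    (result, 1, 1)
  st.1

-- ===== PORT B =====
def mod_factorials_alt (mod : Int) (N : List Int) : List Int :=
  N.foldl
    (fun res n =>
      res ++ [(PySem.List.pyRange 1 (n + 1) 1).foldl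
        (fun f j => PySem.Int.mod (f * j) mod) 1])
    []

-- ===== PRECONDITION & SPEC =====
-- Pre_ excludes exactly the inputs where Python raises ZeroDivisionError:
-- mod = 0 together with some element ≥ 1 (the inner loop then computes f % 0).
def Pre_mod_factorials (mod : Int) (N : List Int) : Prop :=
  mod ≠ 0 ∨ ∀ n ∈ N, n < 1
instance (mod : Int) (N : List Int) : Decidable (Pre_mod_factorials mod N) := by
  unfold Pre_mod_factorials; infer_instance
def pvWitness_mod_factorials : Int × List Int := (7, [0, 3, 1, 3])

def Spec_mod_factorials (mod : Int) (N : List Int) (out : List Int) : Prop := out = mod_factorials_alt mod N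
instance (mod : Int) (N : List Int) (out : List Int) : Decidable (Spec_mod_factorials mod N out) := by unfold Spec_mod_factorials; infer_instance

-- ===== CLAIM (what is proved, stated in full; the proofs are below) =====
def Claim_equal_mod_factorials : Prop := ∀ (mod : Int) (N : List Int), Dom_mod_factorials mod N → Pre_mod_factorials mod N → Spec_mod_factorials mod N (mod_factorials mod N)

-- ===== LEMMAS AND PROOFS =====

-- f*j % mod chain over range(1, n+1): the value B computes per element.
def pfact (m n : Int) : Int :=
  (PySem.List.pyRange 1 (n + 1) 1).foldl (fun f j => PySem.Int.mod (f * j) m) 1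

theorem alt_eq_map (m : Int) (N : List Int) :
    mod_factorials_alt m N = N.map (pfact m) := by
  unfold mod_factorials_alt pfact
  exact PySem.List.foldl_append_singleton_eq_map ..

theorem pfact_nonpos (m n : Int) (h : n ≤ 0) : pfact m n = 1 := by
  unfold pfact
  rw [PySem.List.pyRange_one_eq_nil (by omega)]
  rfl

-- extending the running chain from i-1 to n
theorem chain_extend (m i n : Int) (h1 : 1 ≤ i) (h2 : i ≤ n + 1) :
    (PySem.List.pyRange i (n + 1) 1).foldl (fun f j => PySem.Int.mod (f * j) m)
      (pfact m (i - 1)) = pfact m n := by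
  unfold pfact
  rw [PySem.List.pyRange_one_append 1 i (n + 1) h1 h2, List.foldl_append]
  norm_num

-- the inner for-j loop: two independent accumulators; the counter adds the range length
theorem inner_eq (m a b f c : Int) :
    (PySem.List.pyRange a b 1).foldl
        (fun (p : Int × Int) j => (PySem.Int.mod (p.1 * j) m, p.2 + 1)) (f, c)
      = ((PySem.List.pyRange a b 1).foldl (fun x j => PySem.Int.mod (x * j) m) f,
         c + ((PySem.List.pyRange a b 1).length : Int)) := by
  rw [PySem.List.foldl_prod_mk (f := fun x j => PySem.Int.mod (x * j) m)
        (g := fun x _ => x + 1)]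
  congr 1
  induction (PySem.List.pyRange a b 1) generalizing c with
  | nil => simp
  | cons x t ih => simp [ih]; omega

theorem len_pyRange_int (a b : Int) :
    ((PySem.List.pyRange a b 1).length : Int) = max 0 (b - a) := by
  rcases (by omega : b ≤ a ∨ a < b) with h | h
  · rw [PySem.List.pyRange_one_eq_nil h]; simp; omega
  · have hl := PySem.List.length_pyRange_one a b
    rw [show PySem.List.pyRange a b 1 = PySem.List.pyRange a b from rfl, hl]
    omega

-- A's outer loop, reduced to a pure per-element set with value pfact t.2
theorem loopA_eq (m : Int) :
    ∀ (ts : List (Int × Int)) (res : List Int) (i : Int),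
      1 ≤ i →
      (∀ t ∈ ts, i - 1 ≤ t.2 ∨ i = 1) →
      ts.Pairwise (fun a b => a.2 ≤ b.2) →
      (ts.foldl
        (fun (s : List Int × Int × Int) t =>
          (PySem.List.pySetD s.1 t.1
            ((PySem.List.pyRange s.2.2 (t.2 + 1) 1).foldl
              (fun (p : Int × Int) j => (PySem.Int.mod (p.1 * j) m, p.2 + 1)) (s.2.1, s.2.2)).1,
           ((PySem.List.pyRange s.2.2 (t.2 + 1) 1).foldl
              (fun (p : Int × Int) j => (PySem.Int.mod (p.1 * j) m, p.2 + 1)) (s.2.1, s.2.2)).1,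
           ((PySem.List.pyRange s.2.2 (t.2 + 1) 1).foldl
              (fun (p : Int × Int) j => (PySem.Int.mod (p.1 * j) m, p.2 + 1)) (s.2.1, s.2.2)).2))
        (res, pfact m (i - 1), i)).1
      = ts.foldl (fun r t => PySem.List.pySetD r t.1 (pfact m t.2)) res := by
  intro ts
  induction ts with
  | nil => intro res i _ _ _; rfl
  | cons t ts ih =>
      intro res i hi hlo hpw
      have hpw' := List.pairwise_cons.mp hpw
      simp only [List.foldl_cons]
      rw [inner_eq, len_pyRange_int]
      rcases (by omega : t.2 + 1 ≤ i ∨ i < t.2 + 1) with hle | hlt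
      · have hmax : i + max 0 (t.2 + 1 - i) = i := by omega
        have hr : PySem.List.pyRange i (t.2 + 1) 1 = [] :=
          PySem.List.pyRange_one_eq_nil hle
        have hfact : pfact m (i - 1) = pfact m t.2 := by
          rcases hlo t (List.mem_cons_self ..) with h | h
          · have ht : t.2 = i - 1 := by omega
            rw [ht]
          · subst h
            rw [pfact_nonpos m (1 - 1) (by omega), pfact_nonpos m t.2 (by omega)]
        rw [hr]
        simp only [List.foldl_nil, hmax, hfact]
        have h2 := ih (PySem.List.pySetD res t.1 (pfact m t.2)) i hi
          (fun t' ht' => hlo t' (List.mem_cons_of_mem _ ht')) hpw'.2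
        rw [hfact] at h2
        exact h2
      · have hmax : i + max 0 (t.2 + 1 - i) = t.2 + 1 := by omega
        have hfact := chain_extend m i t.2 hi (by omega)
        simp only [hmax, hfact]
        have h2 := ih (PySem.List.pySetD res t.1 (pfact m t.2)) (t.2 + 1) (by omega)
          (fun t' ht' => Or.inl (by have := hpw'.1 t' ht'; omega)) hpw'.2
        rw [show pfact m ((t.2 + 1) - 1) = pfact m t.2 from by norm_num] at h2
        exact h2

-- length is preserved through the setting fold
theorem fold_set_length (v : Int × Int → Int) :
    ∀ (ts : List (Int × Int)) (res : List Int),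
      (ts.foldl (fun r t => PySem.List.pySetD r t.1 (v t)) res).length = res.length := by
  intro ts
  induction ts with
  | nil => intro res; rfl
  | cons t ts ih =>
      intro res
      simp only [List.foldl_cons, ih, PySem.List.length_pySetD]

-- positions no pair touches keep their value
theorem fold_set_not_mem (v : Int × Int → Int) :
    ∀ (ts : List (Int × Int)) (res : List Int) (k : Nat),
      (∀ t ∈ ts, 0 ≤ t.1) → (∀ t ∈ ts, t.1 ≠ (k : Int)) →
      (ts.foldl (fun r t => PySem.List.pySetD r t.1 (v t)) res)[k]? = res[k]? := by
  intro ts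
  induction ts with
  | nil => intro res k _ _; rfl
  | cons t ts ih =>
      intro res k hpos hne
      simp only [List.foldl_cons]
      rw [ih _ k (fun t' ht' => hpos t' (List.mem_cons_of_mem _ ht'))
            (fun t' ht' => hne t' (List.mem_cons_of_mem _ ht'))]
      rw [PySem.List.pySetD_of_nonneg _ _ (hpos t (List.mem_cons_self ..))]
      apply List.getElem?_set_ne
      have h1 := hpos t (List.mem_cons_self ..)
      have h2 := hne t (List.mem_cons_self ..)
      omega

-- a position set by exactly one pair ends with that pair's value
theorem fold_set_mem (v : Int × Int → Int) :
    ∀ (ts : List (Int × Int)) (res : List Int) (t0 : Int × Int) (k : Nat),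
      (∀ t ∈ ts, 0 ≤ t.1) → (ts.map Prod.fst).Nodup →
      t0 ∈ ts → t0.1 = (k : Int) → k < res.length →
      (ts.foldl (fun r t => PySem.List.pySetD r t.1 (v t)) res)[k]? = some (v t0) := by
  intro ts
  induction ts with
  | nil => intro _ _ _ _ _ h; exact absurd h (List.not_mem_nil)
  | cons t ts ih =>
      intro res t0 k hpos hnd hmem hk hlen
      simp only [List.map_cons, List.nodup_cons] at hnd
      simp only [List.foldl_cons]
      rcases List.mem_cons.mp hmem with h0 | h0
      · subst h0
        rw [fold_set_not_mem v ts _ k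
              (fun t' ht' => hpos t' (List.mem_cons_of_mem _ ht'))
              (fun t' ht' => by
                intro hc
                exact hnd.1 (by rw [hk, ← hc]; exact List.mem_map_of_mem ht'))]
        rw [PySem.List.pySetD_of_nonneg _ _ (hpos t0 (List.mem_cons_self ..))]
        have hkk : t0.1.toNat = k := by omega
        rw [hkk]
        exact List.getElem?_set_self (by omega)
      · have hne : t.1 ≠ (k : Int) := by
          intro hc
          exact hnd.1 (by rw [hc, ← hk]; exact List.mem_map_of_mem h0)
        exact ih _ t0 k (fun t' ht' => hpos t' (List.mem_cons_of_mem _ ht')) hnd.2 h0 hk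
          (by rw [PySem.List.length_pySetD]; exact hlen)

-- ===== VERDICT (by name: the statement is the Claim_ definition above) =====
theorem mod_factorials_spec : Claim_equal_mod_factorials := by
  unfold Claim_equal_mod_factorials
  intro m N _ _
  unfold Spec_mod_factorials
  rw [alt_eq_map]
  unfold mod_factorials
  simp only [PySem.List.pyRepeat_singleton, Int.toNat_natCast]
  have hperm : (PySem.List.sorted (PySem.List.enumerate N) (fun t => t.2) false).Perm
      (PySem.List.enumerate N) := PySem.List.sorted_perm ..
  have hpos : ∀ t ∈ PySem.List.sorted (PySem.List.enumerate N) (fun t => t.2) false,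
      0 ≤ t.1 := by
    intro t ht
    obtain ⟨k, hk, rfl⟩ := (PySem.List.mem_enumerate_iff N 0 t).mp (hperm.mem_iff.mp ht)
    simp
  have hnd : ((PySem.List.sorted (PySem.List.enumerate N) (fun t => t.2) false).map
      Prod.fst).Nodup := by
    refine ((hperm.map Prod.fst).nodup_iff).mpr ?_
    refine List.pairwise_map.mpr ?_
    exact (PySem.List.pairwise_lt_enumerate N 0).imp (fun h => ne_of_lt h)
  have hsort : (PySem.List.sorted (PySem.List.enumerate N) (fun t => t.2) false).Pairwise
      (fun a b => a.2 ≤ b.2) := PySem.List.sorted_pairwise ..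
  rw [show ((List.replicate N.length (1 : Int)), (1 : Int), (1 : Int))
        = (List.replicate N.length (1 : Int), pfact m (1 - 1), 1) from by
      rw [pfact_nonpos m (1 - 1) (by omega)]]
  rw [loopA_eq m _ _ 1 le_rfl (fun t _ => Or.inr rfl) hsort]
  apply List.ext_getElem?
  intro k
  by_cases hk : k < N.length
  · rw [fold_set_mem (fun t => pfact m t.2) _ _ ((k : Int), N[k]) k hpos hnd
        (hperm.mem_iff.mpr ((PySem.List.mem_enumerate_iff N 0 _).mpr ⟨k, hk, by simp⟩))
        rfl (by simpa using hk)]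
    simp [hk]
  · rw [List.getElem?_eq_none (by rw [fold_set_length]; simp; omega),
        List.getElem?_eq_none (by simp; omega)]
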